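-- pv_equiv track=rewrite | github.com/Demkeks/lysozyme_kinetics | src/analyze_slopes.py | cluster_indices
-- ===== SOURCE A (Python) =====
-- from typing import Dict, Iterable, List, Optional, Sequence, Tuple
--
-- def cluster_indices(indices: Sequence[int], max_gap: int = 2) -> List[Tuple[int, int]]:
--     if not indices:
--         return []
--     clusters: List[Tuple[int, int]] = []
--     start = indices[0]
--     prev = indices[0]
--     for idx in indices[1:]:
--         if idx - prev <= max_gap:
--             prev = idx
--             continue
--         clusters.append((start, prev))
--         start = idx
--         prev = idx
--     clusters.append((start, prev))
--     return clusters
-- ===== SOURCE B (Python) =====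
-- from typing import List, Sequence, Tuple
--
--
-- def cluster_indices(indices: Sequence[int], max_gap: int = 2) -> List[Tuple[int, int]]:
--     # Traverse right-to-left, merging each index into the cluster built
--     # immediately after it when the gap is small enough; clusters come out
--     # back-to-front, so reverse once at the end.
--     clusters: List[Tuple[int, int]] = []
--     for x in reversed(indices):
--         if clusters and clusters[-1][0] - x <= max_gap:
--             clusters[-1] = (x, clusters[-1][1])
--         else:
--             clusters.append((x, x))
--     clusters.reverse()
--     return clusters
-- ===== Notes on version B (the rewrite author's own statement) =====
-- stated objective: alternative
-- what changed: B traverses the indices right-to-left and merges each index into the most recently built cluster (extending or opening one), eliminating A's start/prev accumulator, the trailing flush append and the explicit empty-list guard.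
import Mathlib
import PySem

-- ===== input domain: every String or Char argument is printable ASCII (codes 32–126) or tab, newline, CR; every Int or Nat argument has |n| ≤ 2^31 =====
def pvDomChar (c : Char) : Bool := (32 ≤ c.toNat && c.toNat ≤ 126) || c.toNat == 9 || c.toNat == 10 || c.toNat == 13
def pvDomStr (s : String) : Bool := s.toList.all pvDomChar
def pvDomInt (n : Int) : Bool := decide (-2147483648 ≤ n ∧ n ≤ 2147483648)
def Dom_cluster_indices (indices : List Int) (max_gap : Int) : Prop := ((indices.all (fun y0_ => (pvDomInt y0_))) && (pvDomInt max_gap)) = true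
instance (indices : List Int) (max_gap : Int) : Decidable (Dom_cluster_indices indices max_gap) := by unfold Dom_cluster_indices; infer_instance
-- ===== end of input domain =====

-- B replaces A's left-to-right start/prev sweep by a right-to-left traversal that merges
-- each index into the cluster built just after it (objective: alternative decomposition).

-- ===== PORT A =====
-- the body of A's for-loop, over the same state (clusters, start, prev)
def aStep (max_gap : Int) (acc : List (Int × Int) × Int × Int) (idx : Int) :
    List (Int × Int) × Int × Int :=
  if idx - acc.2.2 ≤ max_gap then (acc.1, acc.2.1, idx)
  else (acc.1 ++ [(acc.2.1, acc.2.2)], idx, idx)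

def cluster_indices (indices : List Int) (max_gap : Int) : List (Int × Int) :=
  match indices with
  | [] => []
  | x :: rest =>
    let st := rest.foldl (aStep max_gap) ([], x, x)
    st.1 ++ [(st.2.1, st.2.2)]

-- ===== PORT B =====
-- Source B iterates `reversed(indices)`, keeping the clusters back-to-front (clusters[-1] is
-- the one nearest the output's front) and reversing once at the end; that loop is exactly
-- a foldr building the same clusters front-first: the branch test clusters[-1][0] - x
-- <= max_gap is the head's low endpoint here, append is cons, and no final reverse is needed.
def clusterStep (max_gap x : Int) (acc : List (Int × Int)) : List (Int × Int) :=
  match acc with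
  | (lo, hi) :: t => if lo - x ≤ max_gap then (x, hi) :: t else (x, x) :: (lo, hi) :: t
  | [] => [(x, x)]

def cluster_indices_alt (indices : List Int) (max_gap : Int) : List (Int × Int) :=
  indices.foldr (clusterStep max_gap) []

-- ===== PRECONDITION & SPEC =====
def Spec_cluster_indices (indices : List Int) (max_gap : Int) (out : List (Int × Int)) : Prop := out = cluster_indices_alt indices max_gap
instance (indices : List Int) (max_gap : Int) (out : List (Int × Int)) : Decidable (Spec_cluster_indices indices max_gap out) := by unfold Spec_cluster_indices; infer_instance

-- ===== CLAIM (what is proved, stated in full; the proofs are below) =====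
def Claim_equal_cluster_indices : Prop := ∀ (indices : List Int) (max_gap : Int), Dom_cluster_indices indices max_gap → Spec_cluster_indices indices max_gap (cluster_indices indices max_gap)

-- ===== LEMMAS AND PROOFS =====

-- proof-only helper: flush the pending (start, prev) cluster of A's loop into
-- the clusters that B builds from the remaining suffix
def mergeInto (max_gap s p : Int) (acc : List (Int × Int)) : List (Int × Int) :=
  match acc with
  | [] => [(s, p)]
  | (lo, hi) :: r => if lo - p ≤ max_gap then (s, hi) :: r else (s, p) :: (lo, hi) :: r

theorem mergeInto_clusterStep (g s p y : Int) (acc : List (Int × Int)) :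
    mergeInto g s p (clusterStep g y acc) =
      if y - p ≤ g then mergeInto g s y acc else (s, p) :: mergeInto g y y acc := by
  match acc with
  | [] => simp [clusterStep, mergeInto]
  | (lo, hi) :: r =>
    simp only [clusterStep, mergeInto]
    split_ifs <;> simp_all

theorem mergeInto_self (g x : Int) (acc : List (Int × Int)) :
    mergeInto g x x acc = clusterStep g x acc := by
  match acc with
  | [] => rfl
  | (lo, hi) :: r => rfl

theorem loop_eq (g : Int) :
    ∀ (t : List Int) (cl : List (Int × Int)) (s p : Int),
      (t.foldl (aStep g) (cl, s, p)).1 ++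
        [((t.foldl (aStep g) (cl, s, p)).2.1, (t.foldl (aStep g) (cl, s, p)).2.2)] =
      cl ++ mergeInto g s p (t.foldr (clusterStep g) []) := by
  intro t
  induction t with
  | nil => intro cl s p; simp [mergeInto]
  | cons y t ih =>
    intro cl s p
    simp only [List.foldl_cons, List.foldr_cons, aStep, mergeInto_clusterStep]
    by_cases h : y - p ≤ g
    · simp [h, ih]
    · simp [h, ih]

theorem cluster_indices_eq_alt (indices : List Int) (max_gap : Int) :
    cluster_indices indices max_gap = cluster_indices_alt indices max_gap := by
  match indices with
  | [] => rfl
  | x :: rest =>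
    show (rest.foldl (aStep max_gap) ([], x, x)).1 ++ _ = _
    rw [loop_eq max_gap rest [] x x]
    simp [cluster_indices_alt, mergeInto_self]

-- ===== VERDICT (by name: the statement is the Claim_ definition above) =====
theorem cluster_indices_spec : Claim_equal_cluster_indices := by
  intro indices max_gap _
  exact cluster_indices_eq_alt indices max_gap
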